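-- pv_equiv track=rewrite | github.com/EdW1-0/SpaceSim | views/orbitContext.py | branchPath
-- ===== SOURCE A (Python) =====
-- def branchPath(path, compare, keepJunction = True):
--     branchPoint = 0
--     subPath = None
--     # Record all of the path beyond the point where it's identical to the longest
--     for i in range(len(path)):
--         if not subPath and (path[i] == compare[i]):
--             branchPoint = path[i]
--             continue
--         elif not subPath:
--             # Include the branch point so we know where to start drawing
--             subPath = [branchPoint]
--
--         subPath.append(path[i])
--
--     return subPath
-- ===== SOURCE B (Python) =====
-- def branchPath(path, compare, keepJunction = True):
--     # Phase 1: find the divergence index with a plain scan.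
--     i = 0
--     while i < len(path) and path[i] == compare[i]:
--         i += 1
--     # Phase 2: fully matched -> None; else branch point + remaining suffix.
--     if i == len(path):
--         return None
--     branchPoint = path[i - 1] if i > 0 else 0
--     return [branchPoint] + list(path[i:])
-- ===== Notes on version B (the rewrite author's own statement) =====
-- stated objective: simpler
-- what changed: Replaces the flag-driven accumulation loop (mutable branchPoint/subPath state per element) with two phases: a plain scan that finds the divergence index, then a slice-based construction of the result.
import Mathlib
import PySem

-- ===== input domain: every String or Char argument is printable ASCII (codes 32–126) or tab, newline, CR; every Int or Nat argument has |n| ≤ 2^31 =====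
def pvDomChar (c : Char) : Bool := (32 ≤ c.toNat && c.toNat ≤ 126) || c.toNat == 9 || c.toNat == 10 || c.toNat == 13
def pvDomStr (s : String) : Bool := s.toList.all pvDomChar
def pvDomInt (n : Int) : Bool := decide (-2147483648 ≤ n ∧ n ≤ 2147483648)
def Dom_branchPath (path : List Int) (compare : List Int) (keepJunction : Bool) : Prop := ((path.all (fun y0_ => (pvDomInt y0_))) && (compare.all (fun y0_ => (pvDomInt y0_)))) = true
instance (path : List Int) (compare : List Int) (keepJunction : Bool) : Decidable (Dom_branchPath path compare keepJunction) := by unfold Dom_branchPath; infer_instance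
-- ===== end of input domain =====

-- B is a two-phase re-decomposition of A (find divergence index, then build by slicing);
-- equal return values on Pre_ (the inputs where A does not raise IndexError).

-- shared index primitive: xs[i] for a loop index known in range (default never used under Pre_)
def pvAt (xs : List Int) (i : Nat) : Int := PySem.List.pyGetD xs (Int.ofNat i) 0

-- ===== PORT A =====
-- A's loop 'for i in range(len(path))' with state (branchPoint, subPath), transliterated
-- as index recursion; 'not subPath' is Python truthiness (None or empty list).
def branchPathGo (path : List Int) (compare : List Int) (i : Nat)
    (bp : Int) (sub : Option (List Int)) : Option (List Int) :=
  if h : i < path.length then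
    if (sub.getD []).isEmpty ∧ pvAt path i = pvAt compare i then
      branchPathGo path compare (i + 1) (pvAt path i) sub
    else
      let sub' := if (sub.getD []).isEmpty then [bp] else sub.getD []
      branchPathGo path compare (i + 1) bp (some (sub' ++ [pvAt path i]))
  else sub
termination_by path.length - i

def branchPath (path : List Int) (compare : List Int) (keepJunction : Bool) : Option (List Int) :=
  branchPathGo path compare 0 0 none

-- ===== PORT B =====
-- B's phase 1: 'while i < len(path) and path[i] == compare[i]: i += 1'
def findDiv (path : List Int) (compare : List Int) (i : Nat) : Nat :=
  if h : i < path.length then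
    if pvAt path i = pvAt compare i then findDiv path compare (i + 1) else i
  else i
termination_by path.length - i

def branchPath_alt (path : List Int) (compare : List Int) (keepJunction : Bool) : Option (List Int) :=
  let i := findDiv path compare 0
  if i = path.length then none
  else
    let branchPoint := if 0 < i then pvAt path (i - 1) else 0
    some (branchPoint :: path.drop i)   -- path[i:] with 0 ≤ i, exact

-- ===== PRECONDITION & SPEC =====
-- Pre_ excludes exactly the inputs where A raises IndexError: compare shorter than path
-- while still matching elementwise (compare is a proper prefix of path's values).
def Pre_branchPath (path : List Int) (compare : List Int) (keepJunction : Bool) : Prop :=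
  ¬ (compare.length < path.length ∧ path.take compare.length = compare)
instance (path : List Int) (compare : List Int) (keepJunction : Bool) : Decidable (Pre_branchPath path compare keepJunction) := by unfold Pre_branchPath; infer_instance
def pvWitness_branchPath : List Int × List Int × Bool := ([1, 2, 3], [1, 5, 6], true)

def Spec_branchPath (path : List Int) (compare : List Int) (keepJunction : Bool) (out : Option (List Int)) : Prop := out = branchPath_alt path compare keepJunction
instance (path : List Int) (compare : List Int) (keepJunction : Bool) (out : Option (List Int)) : Decidable (Spec_branchPath path compare keepJunction out) := by unfold Spec_branchPath; infer_instance

-- ===== CLAIM (what is proved, stated in full; the proofs are below) =====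
def Claim_equal_branchPath : Prop := ∀ (path : List Int) (compare : List Int) (keepJunction : Bool), Dom_branchPath path compare keepJunction → Pre_branchPath path compare keepJunction → Spec_branchPath path compare keepJunction (branchPath path compare keepJunction)

-- ===== LEMMAS AND PROOFS =====

theorem pvAt_eq (path : List Int) (i : Nat) (h : i < path.length) : pvAt path i = path[i] := by
  simp [pvAt, List.getD, List.getElem?_eq_getElem h]

theorem findDiv_ge (path compare : List Int) (i : Nat) : i ≤ findDiv path compare i := by
  unfold findDiv
  split
  · split
    · exact le_trans (Nat.le_succ i) (findDiv_ge path compare (i + 1))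
    · exact le_refl i
  · exact le_refl i
termination_by path.length - i

theorem findDiv_step (path compare : List Int) (i : Nat) (h : i < path.length)
    (heq : pvAt path i = pvAt compare i) :
    findDiv path compare i = findDiv path compare (i + 1) := by
  conv_lhs => unfold findDiv
  rw [dif_pos h, if_pos heq]

theorem findDiv_stop (path compare : List Int) (i : Nat) (h : i < path.length)
    (hne : ¬ pvAt path i = pvAt compare i) : findDiv path compare i = i := by
  unfold findDiv; rw [dif_pos h, if_neg hne]

theorem findDiv_done (path compare : List Int) (i : Nat) (h : ¬ i < path.length) :
    findDiv path compare i = i := by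
  unfold findDiv; rw [dif_neg h]

-- once sub is a nonempty list, A's loop just appends the remaining path elements
theorem branchPathGo_some (path compare : List Int) (i : Nat) (bp : Int) (l : List Int)
    (hl : l ≠ []) :
    branchPathGo path compare i bp (some l) = some (l ++ path.drop i) := by
  unfold branchPathGo
  split
  · next h =>
    have hE : l.isEmpty = false := by simpa [List.isEmpty_iff] using hl
    rw [if_neg (by simp [hE])]
    simp only [Option.getD_some, hE, Bool.false_eq_true, if_false]
    rw [branchPathGo_some path compare (i + 1) bp _ (by simp)]
    rw [List.drop_eq_getElem_cons h, pvAt_eq path i h]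
    simp
  · next h =>
    rw [List.drop_of_length_le (by omega)]
    simp
termination_by path.length - i

-- A's loop from a None sub, characterised by the divergence index
theorem branchPathGo_none (path compare : List Int) (i : Nat) (bp : Int)
    (hi : i ≤ path.length) :
    branchPathGo path compare i bp none =
      (if findDiv path compare i = path.length then none
       else some ((if findDiv path compare i = i then bp
                   else pvAt path (findDiv path compare i - 1)) ::
                  path.drop (findDiv path compare i))) := by
  unfold branchPathGo
  split
  · next h =>
    by_cases heq : pvAt path i = pvAt compare i
    · rw [if_pos ⟨rfl, heq⟩]
      rw [branchPathGo_none path compare (i + 1) (pvAt path i) (by omega)]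
      rw [findDiv_step path compare i h heq]
      have hge : i + 1 ≤ findDiv path compare (i + 1) := findDiv_ge path compare (i + 1)
      by_cases hlen : findDiv path compare (i + 1) = path.length
      · rw [if_pos hlen, if_pos hlen]
      · rw [if_neg hlen, if_neg hlen]
        congr 2
        by_cases hdi : findDiv path compare (i + 1) = i + 1
        · rw [if_pos hdi, if_neg (by omega), hdi]
          norm_num
        · rw [if_neg hdi, if_neg (by omega)]
    · rw [if_neg (by simpa using heq)]
      show branchPathGo path compare (i + 1) bp (some ([bp] ++ [pvAt path i])) = _
      rw [branchPathGo_some path compare (i + 1) bp _ (by simp)]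
      rw [findDiv_stop path compare i h heq, if_neg (by omega), if_pos rfl]
      rw [List.drop_eq_getElem_cons h, pvAt_eq path i h]
      simp
  · next h =>
    have : i = path.length := by omega
    rw [findDiv_done path compare i h, if_pos this]
termination_by path.length - i

-- ===== VERDICT (by name: the statement is the Claim_ definition above) =====
theorem branchPath_spec : Claim_equal_branchPath := by
  intro path compare keepJunction _ _
  unfold Spec_branchPath branchPath
  rw [branchPathGo_none path compare 0 0 (Nat.zero_le _)]
  have hB : branchPath_alt path compare keepJunction =
      if findDiv path compare 0 = path.length then none
      else some ((if 0 < findDiv path compare 0 then pvAt path (findDiv path compare 0 - 1)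
                  else 0) :: path.drop (findDiv path compare 0)) := rfl
  rw [hB]
  by_cases hlen : findDiv path compare 0 = path.length
  · rw [if_pos hlen, if_pos hlen]
  · rw [if_neg hlen, if_neg hlen]
    congr 2
    by_cases h0 : findDiv path compare 0 = 0
    · rw [if_pos h0, if_neg (by omega)]
    · rw [if_neg h0, if_pos (by omega)]
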